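-- pv_equiv track=rewrite | github.com/QifanYang-bw/the8puzzle | the8puzzle.py | ranged_state_to_hash
-- ===== SOURCE A (Python) =====
-- def ranged_state_to_hash(state, pattern_range, Empty_mark):
-- 	hashres = 0
-- 	iterfact = 1
-- 	n2 = len(state) * len(state)
-- 	for i in range(len(state)):
-- 		for j in range(len(state)):
-- 			if state[i][j] in pattern_range:
-- 				hashres += state[i][j] * iterfact
-- 			else:
-- 				hashres += Empty_mark * iterfact
-- 			iterfact = iterfact * n2
-- 	return hashres
-- ===== SOURCE B (Python) =====
-- def ranged_state_to_hash(state, pattern_range, Empty_mark):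
--     n = len(state)
--     vals = [row[j] if row[j] in pattern_range else Empty_mark
--             for row in state for j in range(n)]
--     hashres = 0
--     for v in reversed(vals):
--         hashres = hashres * (n * n) + v
--     return hashres
-- ===== Notes on version B (the rewrite author's own statement) =====
-- stated objective: alternative
-- what changed: Replaces the running positional-weight variable (iterfact) by a Horner fold over the substituted cell values in reverse row-major order, after flattening the grid with a comprehension.
import Mathlib
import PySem

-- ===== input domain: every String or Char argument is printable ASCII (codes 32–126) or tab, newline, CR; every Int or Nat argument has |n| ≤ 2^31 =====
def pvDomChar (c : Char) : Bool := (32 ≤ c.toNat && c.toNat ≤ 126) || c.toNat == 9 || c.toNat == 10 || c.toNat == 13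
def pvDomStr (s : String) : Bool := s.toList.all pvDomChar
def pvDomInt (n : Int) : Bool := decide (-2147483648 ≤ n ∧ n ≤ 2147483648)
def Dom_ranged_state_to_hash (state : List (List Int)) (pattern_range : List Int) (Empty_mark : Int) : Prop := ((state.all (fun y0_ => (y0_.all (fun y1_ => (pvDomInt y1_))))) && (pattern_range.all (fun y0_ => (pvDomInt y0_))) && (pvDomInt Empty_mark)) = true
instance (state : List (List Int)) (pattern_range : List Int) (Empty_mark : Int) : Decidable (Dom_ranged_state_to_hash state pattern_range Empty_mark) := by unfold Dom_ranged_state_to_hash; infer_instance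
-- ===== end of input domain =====

-- B replaces A's running positional-weight variable (iterfact) by a Horner fold over the
-- substituted cell values in reverse row-major order (alternative decomposition, same cost).

-- ===== PORT A =====
-- Literal port of A's nested index loops with the (hashres, iterfact) state.
-- Out-of-range indexing (a row shorter than len(state)) raises IndexError in Python;
-- pyGetD's default 0 is only reached outside Pre_.
def ranged_state_to_hash (state : List (List Int)) (pattern_range : List Int) (Empty_mark : Int) : Int :=
  let n2 : Int := (state.length : Int) * (state.length : Int)
  (((PySem.List.pyRange 0 (state.length : Int) 1).foldl (fun (acc : Int × Int) i =>
      (PySem.List.pyRange 0 (state.length : Int) 1).foldl (fun (acc : Int × Int) j =>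
        let cell := PySem.List.pyGetD (PySem.List.pyGetD state i []) j 0
        if cell ∈ pattern_range then (acc.1 + cell * acc.2, acc.2 * n2)
        else (acc.1 + Empty_mark * acc.2, acc.2 * n2)) acc)
    ((0 : Int), (1 : Int)))).1

-- ===== PORT B =====
-- Literal port of B: flatten the substituted grid row-major, then a Horner fold in reverse.
def ranged_state_to_hash_alt (state : List (List Int)) (pattern_range : List Int) (Empty_mark : Int) : Int :=
  let n : Int := (state.length : Int)
  let vals : List Int := state.flatMap (fun row =>
    (PySem.List.pyRange 0 n 1).map (fun j =>
      let cell := PySem.List.pyGetD row j 0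
      if cell ∈ pattern_range then cell else Empty_mark))
  vals.reverse.foldl (fun h v => h * (n * n) + v) 0

-- ===== PRECONDITION & SPEC =====
-- Pre_ excludes exactly the inputs on which Python A raises IndexError: a row with
-- fewer than len(state) entries (both A and B raise there).
def Pre_ranged_state_to_hash (state : List (List Int)) (pattern_range : List Int) (Empty_mark : Int) : Prop :=
  ∀ row ∈ state, state.length ≤ row.length
instance (state : List (List Int)) (pattern_range : List Int) (Empty_mark : Int) : Decidable (Pre_ranged_state_to_hash state pattern_range Empty_mark) := by unfold Pre_ranged_state_to_hash; infer_instance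
def pvWitness_ranged_state_to_hash : List (List Int) × List Int × Int := ([[1, 0], [2, 3]], [1, 2, 3], 0)

def Spec_ranged_state_to_hash (state : List (List Int)) (pattern_range : List Int) (Empty_mark : Int) (out : Int) : Prop := out = ranged_state_to_hash_alt state pattern_range Empty_mark
instance (state : List (List Int)) (pattern_range : List Int) (Empty_mark : Int) (out : Int) : Decidable (Spec_ranged_state_to_hash state pattern_range Empty_mark out) := by unfold Spec_ranged_state_to_hash; infer_instance

-- ===== CLAIM (what is proved, stated in full; the proofs are below) =====
def Claim_equal_ranged_state_to_hash : Prop := ∀ (state : List (List Int)) (pattern_range : List Int) (Empty_mark : Int), Dom_ranged_state_to_hash state pattern_range Empty_mark → Pre_ranged_state_to_hash state pattern_range Empty_mark → Spec_ranged_state_to_hash state pattern_range Empty_mark (ranged_state_to_hash state pattern_range Empty_mark)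

-- ===== LEMMAS AND PROOFS =====

-- base-b value of a list of digits, least-significant first
def pvPolyval (b : Int) : List Int → Int
  | [] => 0
  | v :: t => v + b * pvPolyval b t

theorem pvPairFold (b : Int) (vs : List Int) : ∀ (h p : Int),
    (vs.foldl (fun (acc : Int × Int) v => (acc.1 + v * acc.2, acc.2 * b)) (h, p)).1
      = h + p * pvPolyval b vs := by
  induction vs with
  | nil => intro h p; simp [pvPolyval]
  | cons v t ih => intro h p; simp only [List.foldl_cons, ih, pvPolyval]; ring

theorem pvHorner (b : Int) (vs : List Int) : ∀ (h0 : Int),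
    vs.reverse.foldl (fun h v => h * b + v) h0 = h0 * b ^ vs.length + pvPolyval b vs := by
  induction vs with
  | nil => intro h0; simp [pvPolyval]
  | cons v t ih =>
      intro h0
      simp only [List.reverse_cons, List.foldl_append, List.foldl_cons, List.foldl_nil, ih,
        pvPolyval, List.length_cons]
      ring

theorem pvFoldlFlatMap {α β γ : Type} (f : α → List β) (g : γ → β → γ) (l : List α) :
    ∀ (init : γ), (l.flatMap f).foldl g init = l.foldl (fun acc x => (f x).foldl g acc) init := by
  induction l with
  | nil => intro init; simp
  | cons x t ih => intro init; simp [List.flatMap_cons, List.foldl_append, ih]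

theorem ranged_state_to_hash_eq (state : List (List Int)) (pattern_range : List Int) (Empty_mark : Int) :
    ranged_state_to_hash state pattern_range Empty_mark
      = ranged_state_to_hash_alt state pattern_range Empty_mark := by
  unfold ranged_state_to_hash ranged_state_to_hash_alt
  show (((PySem.List.pyRange 0 (state.length : Int) 1).foldl (fun (acc : Int × Int) i =>
      (PySem.List.pyRange 0 (state.length : Int) 1).foldl (fun (acc : Int × Int) j =>
        let cell := PySem.List.pyGetD (PySem.List.pyGetD state i []) j 0
        if cell ∈ pattern_range then
          (acc.1 + cell * acc.2, acc.2 * ((state.length : Int) * (state.length : Int)))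
        else
          (acc.1 + Empty_mark * acc.2, acc.2 * ((state.length : Int) * (state.length : Int)))) acc)
    ((0 : Int), (1 : Int))).1)
    = (state.flatMap (fun row =>
        (PySem.List.pyRange 0 (state.length : Int) 1).map (fun j =>
          let cell := PySem.List.pyGetD row j 0
          if cell ∈ pattern_range then cell else Empty_mark))).reverse.foldl
        (fun h v => h * ((state.length : Int) * (state.length : Int)) + v) 0
  set n : Int := (state.length : Int) with hn
  set val : List Int → Int → Int := fun row j =>
    let cell := PySem.List.pyGetD row j 0
    if cell ∈ pattern_range then cell else Empty_mark with hval
  set step : Int × Int → Int → Int × Int :=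
    fun acc v => (acc.1 + v * acc.2, acc.2 * (n * n)) with hstep
  -- inner loop body = step applied to the substituted cell value
  have hbody : ∀ (row : List Int),
      (fun (acc : Int × Int) (j : Int) =>
        let cell := PySem.List.pyGetD row j 0
        if cell ∈ pattern_range then (acc.1 + cell * acc.2, acc.2 * (n * n))
        else (acc.1 + Empty_mark * acc.2, acc.2 * (n * n)))
      = (fun (acc : Int × Int) (j : Int) => step acc (val row j)) := by
    intro row
    funext acc j
    simp only [hval, hstep]
    split <;> rfl
  -- inner loop = fold of step over the mapped (substituted) row values
  have hinner : ∀ (row : List Int) (acc : Int × Int),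
      (PySem.List.pyRange 0 n 1).foldl (fun (acc : Int × Int) j =>
        let cell := PySem.List.pyGetD row j 0
        if cell ∈ pattern_range then (acc.1 + cell * acc.2, acc.2 * (n * n))
        else (acc.1 + Empty_mark * acc.2, acc.2 * (n * n))) acc
      = ((PySem.List.pyRange 0 n 1).map (val row)).foldl step acc := by
    intro row acc
    rw [hbody row, List.foldl_map]
  -- outer loop over indices = fold over the rows themselves
  have houter :
      (PySem.List.pyRange 0 n 1).foldl (fun (acc : Int × Int) i =>
        (PySem.List.pyRange 0 n 1).foldl (fun (acc : Int × Int) j =>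
          let cell := PySem.List.pyGetD (PySem.List.pyGetD state i []) j 0
          if cell ∈ pattern_range then (acc.1 + cell * acc.2, acc.2 * (n * n))
          else (acc.1 + Empty_mark * acc.2, acc.2 * (n * n))) acc) ((0 : Int), (1 : Int))
      = state.foldl (fun acc row => ((PySem.List.pyRange 0 n 1).map (val row)).foldl step acc)
          ((0 : Int), (1 : Int)) := by
    have hfun : (fun (acc : Int × Int) (i : Int) =>
        (PySem.List.pyRange 0 n 1).foldl (fun (acc : Int × Int) j =>
          let cell := PySem.List.pyGetD (PySem.List.pyGetD state i []) j 0
          if cell ∈ pattern_range then (acc.1 + cell * acc.2, acc.2 * (n * n))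
          else (acc.1 + Empty_mark * acc.2, acc.2 * (n * n))) acc)
        = (fun (acc : Int × Int) (i : Int) =>
            ((PySem.List.pyRange 0 n 1).map (val (PySem.List.pyGetD state i []))).foldl step acc) := by
      funext acc i
      exact hinner (PySem.List.pyGetD state i []) acc
    rw [hfun, hn]
    exact PySem.List.foldl_pyRange_zero_pyGetD' state ([] : List Int)
      (fun acc row => ((PySem.List.pyRange 0 (state.length : Int) 1).map (val row)).foldl step acc)
      ((0 : Int), (1 : Int))
  rw [houter, ← pvFoldlFlatMap (fun row => (PySem.List.pyRange 0 n 1).map (val row)) step,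
    pvPairFold, pvHorner]
  simp only [hval]
  ring

-- ===== VERDICT (by name: the statement is the Claim_ definition above) =====
theorem ranged_state_to_hash_spec : Claim_equal_ranged_state_to_hash := by
  intro state pattern_range Empty_mark _ _
  exact ranged_state_to_hash_eq state pattern_range Empty_mark
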